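-- pv_equiv track=rewrite | github.com/Jialin-Bi/Topological-index | code/complex_index_A0_fil_more.py | get_diff_len_simplex
-- ===== SOURCE A (Python) =====
-- def get_diff_len_simplex(Simplex_list):
--     #key=k value:k-simplex
--     Simplex_dict={}
--     for simplex in Simplex_list:
--         dimen=len(simplex)-1
--         if dimen not in Simplex_dict:
--             Simplex_dict[dimen]=[simplex]
--         else:
--             Simplex_dict[dimen].append(simplex)
--     for key, value in Simplex_dict.items():
--         Simplex_dict[key]=sorted(Simplex_dict[key])
--     return Simplex_dict
-- ===== SOURCE B (Python) =====
-- def get_diff_len_simplex(Simplex_list):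
--     # sort once globally, then partition by dimension; keys pre-seeded in
--     # first-appearance order so the returned dict is identical to A's
--     Simplex_dict = {len(s) - 1: [] for s in Simplex_list}
--     for simplex in sorted(Simplex_list):
--         Simplex_dict[len(simplex) - 1].append(simplex)
--     return Simplex_dict
-- ===== Notes on version B (the rewrite author's own statement) =====
-- stated objective: alternative
-- what changed: A partitions the simplices into a dict bucket-by-bucket and then sorts each bucket separately; B pre-seeds the keys in first-appearance order, sorts the whole list once, and fills the buckets in one pass over the sorted list (each bucket comes out already sorted, so the per-group sorts disappear).
import Mathlib
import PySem

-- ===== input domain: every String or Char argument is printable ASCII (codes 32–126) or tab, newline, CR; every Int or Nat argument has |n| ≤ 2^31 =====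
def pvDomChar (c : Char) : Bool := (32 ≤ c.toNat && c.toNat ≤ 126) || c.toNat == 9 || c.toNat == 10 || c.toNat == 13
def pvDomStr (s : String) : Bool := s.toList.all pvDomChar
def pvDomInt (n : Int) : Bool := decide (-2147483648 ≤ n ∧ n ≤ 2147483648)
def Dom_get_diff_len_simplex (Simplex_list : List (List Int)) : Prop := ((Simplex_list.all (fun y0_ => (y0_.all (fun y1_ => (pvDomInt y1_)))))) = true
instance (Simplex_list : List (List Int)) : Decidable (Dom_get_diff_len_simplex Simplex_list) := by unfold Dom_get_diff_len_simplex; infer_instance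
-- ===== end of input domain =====

-- B replaces A's "partition into a dict, then sort each bucket" by "pre-seed the keys,
-- sort the whole list once, then partition it"; an alternative decomposition, same return value.

-- ===== PORT A =====
-- A: one pass builds the dict (new key -> [simplex], else append), then each value is sorted.
def get_diff_len_simplex (Simplex_list : List (List Int)) : List (Int × List (List Int)) :=
  let d := Simplex_list.foldl (fun d simplex =>
      let dimen : Int := (simplex.length : Int) - 1
      if d.contains dimen then d.modify dimen [] (fun v => v ++ [simplex])
      else d.insert dimen [simplex]) PySem.Dict.empty
  -- for key, value in d.items(): d[key] = sorted(d[key])  (keys unchanged during the loop)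
  let d2 := d.items.foldl (fun d' p =>
      d'.insert p.1 (PySem.List.sorted (d'.getD p.1 []) (fun x => x))) d
  d2.items

-- ===== PORT B =====
-- B: dict comprehension seeds every key with []; then one pass over sorted(Simplex_list)
-- appends each simplex to its bucket (the key is always present, so getD's default is never used).
def get_diff_len_simplex_alt (Simplex_list : List (List Int)) : List (Int × List (List Int)) :=
  let seeded := Simplex_list.foldl (fun d s =>
      d.insert ((s.length : Int) - 1) ([] : List (List Int))) PySem.Dict.empty
  let filled := (PySem.List.sorted Simplex_list (fun x => x)).foldl (fun d s =>
      d.modify ((s.length : Int) - 1) [] (fun v => v ++ [s])) seeded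
  filled.items

-- ===== PRECONDITION & SPEC =====
def Spec_get_diff_len_simplex (Simplex_list : List (List Int)) (out : List (Int × List (List Int))) : Prop := out = get_diff_len_simplex_alt Simplex_list
instance (Simplex_list : List (List Int)) (out : List (Int × List (List Int))) : Decidable (Spec_get_diff_len_simplex Simplex_list out) := by unfold Spec_get_diff_len_simplex; infer_instance

-- ===== CLAIM (what is proved, stated in full; the proofs are below) =====
def Claim_equal_get_diff_len_simplex : Prop := ∀ (Simplex_list : List (List Int)), Dom_get_diff_len_simplex Simplex_list → Spec_get_diff_len_simplex Simplex_list (get_diff_len_simplex Simplex_list)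

-- ===== LEMMAS AND PROOFS =====

-- Set.update with only already-present elements is the identity
theorem pv_update_of_mem {α : Type} [BEq α] [LawfulBEq α] (l : List α) (s : PySem.Set α)
    (h : ∀ x ∈ l, x ∈ s) : PySem.Set.update s l = s := by
  induction l generalizing s with
  | nil => rfl
  | cons x t ih =>
      have hx : PySem.Set.add s x = s := PySem.Set.add_of_mem (h x (by simp))
      show PySem.Set.update (PySem.Set.add s x) t = s
      rw [hx]
      exact ih s (fun y hy => h y (by simp [hy]))

-- A's first loop is the plain modify-append loop (the contains-branch is modify's missing-key case)
theorem pvA_loop_eq (l : List (List Int)) (d0 : PySem.Dict Int (List (List Int))) :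
    l.foldl (fun d simplex =>
      let dimen : Int := (simplex.length : Int) - 1
      if d.contains dimen then d.modify dimen [] (fun v => v ++ [simplex])
      else d.insert dimen [simplex]) d0
    = l.foldl (fun d s => d.modify ((s.length : Int) - 1) [] (fun v => v ++ [s])) d0 := by
  apply PySem.List.foldl_congr_mem
  intro d s _
  by_cases h : d.contains ((s.length : Int) - 1) = true
  · simp [h]
  · simp only [Bool.not_eq_true] at h
    simp [h, PySem.Dict.modify, PySem.Dict.getD_of_not_contains _ _ h]

-- getD after a modify-append loop keyed by the dimension
theorem pv_getD_modify_loop (l : List (List Int)) (d : PySem.Dict Int (List (List Int))) (k : Int) :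
    (l.foldl (fun d s => d.modify ((s.length : Int) - 1) [] (fun v => v ++ [s])) d).getD k []
    = d.getD k [] ++ l.filter (fun s => (s.length : Int) - 1 == k) := by
  have h := PySem.Dict.getD_foldl_modify_append (l.map (fun s => ((s.length : Int) - 1, s))) d k
  rw [List.foldl_map] at h
  simpa [List.filter_map, Function.comp_def] using h

-- getD is [] everywhere after B's seeding loop
theorem pv_getD_seed (l : List (List Int)) (d : PySem.Dict Int (List (List Int))) (k : Int)
    (hd : d.getD k [] = []) :
    (l.foldl (fun d s => d.insert ((s.length : Int) - 1) ([] : List (List Int))) d).getD k [] = [] := by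
  induction l generalizing d with
  | nil => exact hd
  | cons s t ih =>
      exact ih _ (by rw [PySem.Dict.getD_insert]; split <;> simp [hd])

-- A's second loop applies f to each bucket exactly once (the iterated keys are distinct)
theorem pv_value_loop (ps : List (Int × List (List Int)))
    (d : PySem.Dict Int (List (List Int))) (hnd : (ps.map Prod.fst).Nodup) (k : Int) :
    (ps.foldl (fun d' p => d'.insert p.1 (PySem.List.sorted (d'.getD p.1 []) (fun x => x))) d).getD k []
    = if k ∈ ps.map Prod.fst then PySem.List.sorted (d.getD k []) (fun x => x) else d.getD k [] := by
  induction ps generalizing d with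
  | nil => simp
  | cons p t ih =>
      simp only [List.map_cons, List.nodup_cons] at hnd
      simp only [List.foldl_cons, List.map_cons, List.mem_cons]
      rw [ih _ hnd.2]
      by_cases hk : k ∈ t.map Prod.fst
      · have hne : k ≠ p.1 := fun h => hnd.1 (h ▸ hk)
        rw [if_pos hk, if_pos (Or.inr hk), PySem.Dict.getD_insert, if_neg hne]
      · by_cases he : k = p.1
        · rw [if_neg hk, if_pos (Or.inl he), PySem.Dict.getD_insert, if_pos he, he]
        · rw [if_neg hk, if_neg (by simp [he, hk]), PySem.Dict.getD_insert, if_neg he]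

-- the two DecidableLT instances on List Int decide the same order
theorem pv_dec_eq : (fun (a b : List Int) => a.decidableLT b) = (List.instLinearOrder.toDecidableLT : DecidableLT (List Int)) := by
  funext a b
  exact Subsingleton.elim _ _

-- bridge: sorted at the default LT/DecidableLT instances is sorted at List.instLinearOrder's
theorem pv_sorted_inst (xs : List (List Int)) :
    PySem.List.sorted xs (fun x => x)
      = @PySem.List.sorted _ _ List.instLinearOrder.toLT List.instLinearOrder.toDecidableLT xs (fun x => x) false := by
  rw [show ((fun (a b : List Int) => a.decidableLT b) : DecidableLT (List Int)) = List.instLinearOrder.toDecidableLT from pv_dec_eq]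

-- a bucket of the global sort is the sorted bucket
theorem pv_filter_sorted (l : List (List Int)) (p : List Int → Bool) :
    (PySem.List.sorted l (fun x => x)).filter p = PySem.List.sorted (l.filter p) (fun x => x) := by
  rw [pv_sorted_inst, pv_sorted_inst]
  have hperm := (@PySem.List.sorted_perm (List Int) (List Int) List.instLinearOrder.toLT
      List.instLinearOrder.toDecidableLT l (fun x => x) false).filter p
  have hpair := (@PySem.List.sorted_pairwise (List Int) (List Int) List.instLinearOrder l (fun x => x)).filter p
  rw [@PySem.List.sorted_eq_sorted_of_perm (List Int) (List Int) List.instLinearOrder _ _ _ (fun a b h => h) hperm.symm,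
    @PySem.List.sorted_eq_self_of_pairwise (List Int) (List Int) List.instLinearOrder _ _ hpair]

-- ===== VERDICT (by name: the statement is the Claim_ definition above) =====
theorem get_diff_len_simplex_spec : Claim_equal_get_diff_len_simplex := by
  intro l _
  show get_diff_len_simplex l = get_diff_len_simplex_alt l
  unfold get_diff_len_simplex get_diff_len_simplex_alt
  rw [pvA_loop_eq]
  set dA := l.foldl (fun d s => d.modify ((s.length : Int) - 1) [] (fun v => v ++ [s])) PySem.Dict.empty with hdA
  set seeded := l.foldl (fun d s => d.insert ((s.length : Int) - 1) ([] : List (List Int))) PySem.Dict.empty with hseed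
  have hKA : dA.keys = PySem.Set.ofList (l.map (fun s => (s.length : Int) - 1)) := by
    rw [hdA, PySem.Dict.keys_foldl_modify_key l (fun s => (s.length : Int) - 1) [] (fun _ s v => v ++ [s])]
    simp [PySem.Set.update_nil_left]
  have hKB : seeded.keys = PySem.Set.ofList (l.map (fun s => (s.length : Int) - 1)) := by
    rw [hseed, PySem.Dict.keys_foldl_insert_key l (fun s => (s.length : Int) - 1) (fun _ _ => [])]
    simp [PySem.Set.update_nil_left]
  have hndA : dA.keys.Nodup := by
    rw [hdA]
    exact PySem.Dict.nodup_keys_foldl_modify_key _ _ _ _ _ (by simp)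
  have hndB : seeded.keys.Nodup := by
    rw [hseed]
    exact PySem.Dict.nodup_keys_foldl_insert_key _ _ _ _ (by simp)
  -- A's second loop keeps keys and sorts each bucket
  have hKA2 : (dA.items.foldl (fun d' p =>
      d'.insert p.1 (PySem.List.sorted (d'.getD p.1 []) (fun x => x))) dA).keys = dA.keys := by
    rw [PySem.Dict.keys_foldl_insert_key dA.items Prod.fst
      (fun d' p => PySem.List.sorted (d'.getD p.1 []) (fun x => x)) dA]
    exact pv_update_of_mem _ _ (fun x hx => by simpa [PySem.Dict.keys] using hx)
  have hndA2 : (dA.items.foldl (fun d' p =>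
      d'.insert p.1 (PySem.List.sorted (d'.getD p.1 []) (fun x => x))) dA).keys.Nodup := by
    rw [hKA2]; exact hndA
  -- B's filling loop keeps keys
  have hKB2 : ((PySem.List.sorted l (fun x => x)).foldl (fun d s =>
      d.modify ((s.length : Int) - 1) [] (fun v => v ++ [s])) seeded).keys = seeded.keys := by
    rw [PySem.Dict.keys_foldl_modify_key (PySem.List.sorted l (fun x => x)) (fun (s : List Int) => (s.length : Int) - 1) [] (fun _ s v => v ++ [s]) seeded]
    apply pv_update_of_mem
    intro x hx
    rw [hKB, PySem.Set.mem_ofList]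
    simp only [List.mem_map] at hx ⊢
    obtain ⟨s, hs, rfl⟩ := hx
    exact ⟨s, (PySem.List.sorted_perm l (fun x => x) false).mem_iff.mp hs, rfl⟩
  have hndB2 : ((PySem.List.sorted l (fun x => x)).foldl (fun d s =>
      d.modify ((s.length : Int) - 1) [] (fun v => v ++ [s])) seeded).keys.Nodup := by
    rw [hKB2]; exact hndB
  rw [PySem.Dict.items_eq_map_keys _ hndA2 [], PySem.Dict.items_eq_map_keys _ hndB2 [],
    hKA2, hKB2, hKA, hKB]
  apply List.map_congr_left
  intro k hk
  have hmemA : k ∈ dA.items.map Prod.fst := by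
    have : k ∈ dA.keys := by rw [hKA]; exact hk
    simpa [PySem.Dict.keys] using this
  rw [pv_value_loop dA.items dA (by simpa [PySem.Dict.keys] using hndA) k, if_pos hmemA,
    pv_getD_modify_loop, pv_getD_modify_loop]
  rw [hseed, pv_getD_seed l _ k rfl]
  simp [pv_filter_sorted l (fun s => (s.length : Int) - 1 == k), PySem.Dict.getD_empty]
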